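-- pv_equiv track=rewrite | github.com/BazarovaAnna/ASD_AlgoIntro | asd1.py | f
-- ===== SOURCE A (Python) =====
-- def f(n,k):
--     #we need to have always k teams.
--     # separate fighters
--     m=n//k
--     ost=n%k
--     sum=0
--     for i in range(ost):
--         n-=m+1
--         sum+=n*(m+1)
--     for i in range(k-ost):
--         n-=m
--         sum+=n*m
--     return sum
-- ===== SOURCE B (Python) =====
-- def f(n, k):
--     m, r = divmod(n, k)
--     c1 = max(r, 0)
--     c2 = max(k - r, 0)
--     s1 = (m + 1) * (c1 * n - (m + 1) * (c1 * (c1 + 1) // 2))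
--     n1 = n - c1 * (m + 1)
--     s2 = m * (c2 * n1 - m * (c2 * (c2 + 1) // 2))
--     return s1 + s2
-- ===== Notes on version B (the rewrite author's own statement) =====
-- stated objective: faster
-- what changed: Replaced the two loops that decrement n and accumulate products (k iterations total) by closed-form arithmetic-series formulas for both product sums.
import Mathlib
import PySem

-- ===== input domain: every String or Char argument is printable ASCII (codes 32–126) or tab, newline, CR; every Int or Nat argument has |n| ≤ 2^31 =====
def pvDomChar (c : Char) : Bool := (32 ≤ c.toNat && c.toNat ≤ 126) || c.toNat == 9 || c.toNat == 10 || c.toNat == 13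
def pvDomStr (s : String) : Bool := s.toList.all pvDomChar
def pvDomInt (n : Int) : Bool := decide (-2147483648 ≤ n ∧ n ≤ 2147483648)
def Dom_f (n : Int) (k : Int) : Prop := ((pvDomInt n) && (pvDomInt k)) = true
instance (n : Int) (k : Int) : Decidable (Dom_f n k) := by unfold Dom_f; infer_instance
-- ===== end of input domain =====

-- B replaces A's two O(k)-step loops by a closed-form arithmetic-series formula (objective: faster, asymptotic O(k) → O(1)).

-- ===== PORT A =====
def f (n : Int) (k : Int) : Int :=
  let m := PySem.Int.floordiv n k
  let ost := PySem.Int.mod n k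
  let st1 := (PySem.List.pyRange 0 ost 1).foldl
    (fun (p : Int × Int) _ => (p.1 - (m + 1), p.2 + (p.1 - (m + 1)) * (m + 1))) (n, 0)
  let st2 := (PySem.List.pyRange 0 (k - ost) 1).foldl
    (fun (p : Int × Int) _ => (p.1 - m, p.2 + (p.1 - m) * m)) st1
  st2.2

-- ===== PORT B =====
def f_alt (n : Int) (k : Int) : Int :=
  let m := PySem.Int.floordiv n k
  let r := PySem.Int.mod n k
  let c1 := max r 0
  let c2 := max (k - r) 0
  let s1 := (m + 1) * (c1 * n - (m + 1) * PySem.Int.floordiv (c1 * (c1 + 1)) 2)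
  let n1 := n - c1 * (m + 1)
  let s2 := m * (c2 * n1 - m * PySem.Int.floordiv (c2 * (c2 + 1)) 2)
  s1 + s2

-- ===== PRECONDITION & SPEC =====
-- Pre_f excludes exactly k = 0, on which Python's n // k raises ZeroDivisionError.
def Pre_f (n : Int) (k : Int) : Prop := k ≠ 0
instance (n : Int) (k : Int) : Decidable (Pre_f n k) := by unfold Pre_f; infer_instance
def pvWitness_f : Int × Int := (7, 3)

def Spec_f (n : Int) (k : Int) (out : Int) : Prop := out = f_alt n k
instance (n : Int) (k : Int) (out : Int) : Decidable (Spec_f n k out) := by unfold Spec_f; infer_instance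

-- ===== CLAIM (what is proved, stated in full; the proofs are below) =====
def Claim_equal_f : Prop := ∀ (n : Int) (k : Int), Dom_f n k → Pre_f n k → Spec_f n k (f n k)

-- ===== LEMMAS AND PROOFS =====

-- triangle numbers
def pvTri : Nat → Int
  | 0 => 0
  | (c+1) => pvTri c + (c + 1)

theorem pvTri_two_mul : ∀ c : Nat, 2 * pvTri c = (c : Int) * ((c : Int) + 1) := by
  intro c
  induction c with
  | zero => simp [pvTri]
  | succ c ih => simp only [pvTri]; push_cast; push_cast at ih; ring_nf; ring_nf at ih; omega

theorem pvFloordiv_tri (c : Nat) :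
    PySem.Int.floordiv ((c : Int) * ((c : Int) + 1)) 2 = pvTri c := by
  rw [PySem.Int.floordiv_eq_ediv_of_pos (by norm_num), ← pvTri_two_mul c]
  exact Int.mul_ediv_cancel_left _ (by norm_num)

-- closed form for A's decrement-and-accumulate loop (only the list's length matters)
theorem pvLoop_closed (d : Int) (l : List Int) : ∀ (n s : Int),
    l.foldl (fun (p : Int × Int) _ => (p.1 - d, p.2 + (p.1 - d) * d)) (n, s)
      = (n - (l.length : Int) * d,
         s + d * ((l.length : Int) * n) - d * d * pvTri l.length) := by
  induction l with
  | nil => intro n s; simp [pvTri]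
  | cons x tl ih =>
      intro n s
      simp only [List.foldl_cons, List.length_cons, ih]
      refine Prod.ext ?_ ?_ <;> simp only [pvTri] <;> push_cast <;> ring

-- ===== VERDICT (by name: the statement is the Claim_ definition above) =====
theorem f_spec : Claim_equal_f := by
  intro n k _ hk
  unfold Spec_f f f_alt
  simp only [pvLoop_closed, PySem.List.length_pyRange_one, Int.sub_zero]
  rw [show max (PySem.Int.mod n k) 0 = ((PySem.Int.mod n k).toNat : Int) from
        (Int.toNat_eq_max _).symm,
      show max (k - PySem.Int.mod n k) 0 = (((k - PySem.Int.mod n k)).toNat : Int) from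
        (Int.toNat_eq_max _).symm,
      pvFloordiv_tri, pvFloordiv_tri]
  ring
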